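-- pv_equiv track=rewrite | github.com/elkhaligy/LeetCode | 2. Medium/(6) Jun 2024/Week 4/2285. Maximum Importance of Roads.py | maximumImportance_sol2
-- ===== SOURCE A (Python) =====
-- def maximumImportance_sol2(n: int, roads: list[list[int]]) -> int:
--     node_degree = [0] * n # index: node number, value: node degree
--
--     for edge in roads:
--         node_degree[edge[0]] += 1
--         node_degree[edge[1]] += 1
--
--     node_degree.sort()
--
--     answer = 0
--     num = 1
--
--     for degree in node_degree:
--         answer += degree * num
--         num += 1
--
--     return answer
-- ===== SOURCE B (Python) =====
-- def maximumImportance_sol2(n: int, roads: list[list[int]]) -> int: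
--     degree = [0] * n
--     for e in roads:
--         degree[e[0]] += 1
--         degree[e[1]] += 1
--     # rank the nodes: sort (degree, node) pairs, node gets value 1..n in that order
--     value = [0] * n
--     for rank, (_, node) in enumerate(sorted(zip(degree, range(n))), 1):
--         value[node] = rank
--     # total importance accumulated over the edges themselves
--     return sum(value[e[0]] + value[e[1]] for e in roads)
-- ===== Notes on version B (the rewrite author's own statement) =====
-- stated objective: alternative
-- what changed: Instead of sorting the degree list and summing degree*rank in one pass over sorted degrees, B argsorts the node indices by degree to build a per-node value table (value[node]=rank) and accumulates the answer as value[u]+value[v] by iterating over the edges.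
import Mathlib
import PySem

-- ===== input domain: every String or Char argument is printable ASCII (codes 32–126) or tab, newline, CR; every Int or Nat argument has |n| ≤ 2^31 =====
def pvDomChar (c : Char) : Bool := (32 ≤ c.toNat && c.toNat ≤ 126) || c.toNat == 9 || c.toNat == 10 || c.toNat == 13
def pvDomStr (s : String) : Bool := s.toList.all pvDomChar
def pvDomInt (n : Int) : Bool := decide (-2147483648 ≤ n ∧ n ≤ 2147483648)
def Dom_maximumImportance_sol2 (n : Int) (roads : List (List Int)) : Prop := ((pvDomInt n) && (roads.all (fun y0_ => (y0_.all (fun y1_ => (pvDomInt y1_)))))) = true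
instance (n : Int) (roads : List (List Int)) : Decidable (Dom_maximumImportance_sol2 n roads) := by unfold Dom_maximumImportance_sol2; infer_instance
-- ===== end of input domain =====

-- B reshapes the final pass: instead of summing degree*rank over the sorted degree list, it
-- argsorts the nodes by degree into a per-node value table and sums value[u]+value[v] over the
-- edges (objective: alternative decomposition, same asymptotic cost).

-- ===== PORT A =====
-- d[i] += 1  (Python indexing: negative wraps; out of range = IndexError, excluded by Pre_)
def pvInc (d : List Int) (i : Int) : List Int :=
  PySem.List.pySetD d i (PySem.List.pyGetD d i 0 + 1)

-- the shared first loop of both Pythons: node_degree/degree counting over roads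
def pvDegrees (n : Int) (roads : List (List Int)) : List Int :=
  roads.foldl
    (fun d e => pvInc (pvInc d (PySem.List.pyGetD e 0 0)) (PySem.List.pyGetD e 1 0))
    (List.replicate n.toNat 0)

def maximumImportance_sol2 (n : Int) (roads : List (List Int)) : Int :=
  let node_degree := PySem.List.sorted (pvDegrees n roads) (fun x => x) false
  (node_degree.foldl (fun (p : Int × Int) degree => (p.1 + degree * p.2, p.2 + 1)) (0, 1)).1

-- ===== PORT B =====
def maximumImportance_sol2_alt (n : Int) (roads : List (List Int)) : Int :=
  let degree := pvDegrees n roads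
  -- sorted(zip(degree, range(n))): tuples compare lexicographically -> PySem.List.sorted2
  let order := (PySem.List.sorted2 (degree.zip (PySem.List.pyRange 0 n 1))
                  (fun p => p.1) (fun p => p.2) false).map (fun p => p.2)
  let value := (PySem.List.enumerate order 1).foldl
                 (fun v p => PySem.List.pySetD v p.2 p.1) (List.replicate n.toNat 0)
  roads.foldl
    (fun s e => s + (PySem.List.pyGetD value (PySem.List.pyGetD e 0 0) 0
                     + PySem.List.pyGetD value (PySem.List.pyGetD e 1 0) 0)) 0

-- ===== PRECONDITION & SPEC =====
-- Pre_ excludes exactly the inputs where Python A raises an IndexError: an edge with fewer than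
-- two endpoints, or an endpoint outside the valid (possibly negative) index range of a length-n list.
def Pre_maximumImportance_sol2 (n : Int) (roads : List (List Int)) : Prop :=
  ∀ e ∈ roads, 2 ≤ e.length ∧
    PySem.Raise.InRange n.toNat (PySem.List.pyGetD e 0 0) ∧
    PySem.Raise.InRange n.toNat (PySem.List.pyGetD e 1 0)
instance (n : Int) (roads : List (List Int)) : Decidable (Pre_maximumImportance_sol2 n roads) := by
  unfold Pre_maximumImportance_sol2; infer_instance

def pvWitness_maximumImportance_sol2 : Int × List (List Int) := (3, [[0, 1], [1, 2], [0, 2]])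

def Spec_maximumImportance_sol2 (n : Int) (roads : List (List Int)) (out : Int) : Prop := out = maximumImportance_sol2_alt n roads
instance (n : Int) (roads : List (List Int)) (out : Int) : Decidable (Spec_maximumImportance_sol2 n roads out) := by unfold Spec_maximumImportance_sol2; infer_instance

-- ===== CLAIM (what is proved, stated in full; the proofs are below) =====
def Claim_equal_maximumImportance_sol2 : Prop := ∀ (n : Int) (roads : List (List Int)), Dom_maximumImportance_sol2 n roads → Pre_maximumImportance_sol2 n roads → Spec_maximumImportance_sol2 n roads (maximumImportance_sol2 n roads)

-- ===== LEMMAS AND PROOFS =====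

-- the Nat position a valid (possibly negative) Python index i denotes in a list of length len
def pvIdx (len : Nat) (i : Int) : Nat := if 0 ≤ i then i.toNat else len - (-i).toNat

-- Σ degree*rank with ranks counting up from c (what A's second loop computes)
def pvRankSum : List Int → Int → Int
  | [], _ => 0
  | x :: xs, c => x * c + pvRankSum xs (c + 1)

-- Σ_{j<m} v[j]*d[j]
def pvDot (m : Nat) (v d : List Int) : Int :=
  ((List.range m).map (fun j => v.getD j 0 * d.getD j 0)).sum

theorem pvIdx_lt (len : Nat) (i : Int) (h : PySem.Raise.InRange len i) : pvIdx len i < len := by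
  obtain ⟨h1, h2⟩ := h
  unfold pvIdx
  split_ifs with h0 <;> omega

theorem pyIdx?_inRange (len : Nat) (i : Int) (h : PySem.Raise.InRange len i) :
    PySem.List.pyIdx? len i = some (pvIdx len i) := by
  obtain ⟨h1, h2⟩ := h
  unfold PySem.List.pyIdx? pvIdx
  split_ifs with h0 <;> simp_all

theorem pyGetD_idx (xs : List Int) (i : Int) (d : Int) (h : PySem.Raise.InRange xs.length i) :
    PySem.List.pyGetD xs i d = xs.getD (pvIdx xs.length i) d := by
  have hlt := pvIdx_lt xs.length i h
  simp [PySem.List.pyGetD, PySem.List.pyGet?, pyIdx?_inRange _ _ h,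
        List.getD_eq_getElem?_getD]

theorem pySetD_idx (xs : List Int) (i : Int) (v : Int) (h : PySem.Raise.InRange xs.length i) :
    PySem.List.pySetD xs i v = xs.set (pvIdx xs.length i) v := by
  simp [PySem.List.pySetD, PySem.List.pySet?, pyIdx?_inRange _ _ h]

theorem pvInc_length (d : List Int) (i : Int) : (pvInc d i).length = d.length := by
  simp [pvInc, PySem.List.length_pySetD]

theorem sum_map_congr_single (f g : Nat → Int) (j : Nat) (hfg : ∀ x, x ≠ j → f x = g x) :
    ∀ l : List Nat, l.Nodup → j ∈ l → (l.map f).sum = (l.map g).sum + (f j - g j) := by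
  intro l
  induction l with
  | nil => simp
  | cons a t ih =>
    intro hnd hmem
    rcases List.mem_cons.mp hmem with rfl | hmt
    · have : t.map f = t.map g := by
        apply List.map_congr_left
        intro x hx
        exact hfg x (by rintro rfl; exact (List.nodup_cons.mp hnd).1 hx)
      simp [this]; ring
    · have := ih (List.nodup_cons.mp hnd).2 hmt
      simp [hfg a (by rintro rfl; exact (List.nodup_cons.mp hnd).1 hmt), this]; ring

theorem pvDot_inc (m : Nat) (v d : List Int) (i : Int) (hv : v.length = m) (hd : d.length = m)
    (h : PySem.Raise.InRange m i) :
    pvDot m v (pvInc d i) = pvDot m v d + PySem.List.pyGetD v i 0 := by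
  have hj : pvIdx m i < m := pvIdx_lt m i h
  have hset : pvInc d i = d.set (pvIdx m i) (d.getD (pvIdx m i) 0 + 1) := by
    unfold pvInc
    rw [pyGetD_idx d i 0 (by rw [hd]; exact h), pySetD_idx d i _ (by rw [hd]; exact h), hd]
  have hgv : PySem.List.pyGetD v i 0 = v.getD (pvIdx m i) 0 := by
    rw [pyGetD_idx v i 0 (by rw [hv]; exact h), hv]
  rw [hset, hgv]
  unfold pvDot
  have key := sum_map_congr_single
      (fun j' => v.getD j' 0 * (d.set (pvIdx m i) (d.getD (pvIdx m i) 0 + 1)).getD j' 0)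
      (fun j' => v.getD j' 0 * d.getD j' 0) (pvIdx m i)
      (fun x hx => by
        have hne : (d.set (pvIdx m i) (d.getD (pvIdx m i) 0 + 1)).getD x 0 = d.getD x 0 := by
          simp [List.getD_eq_getElem?_getD, List.getElem?_set, hx, Ne.symm hx]
        simp only [hne])
      (List.range m) (List.nodup_range) (by simp [hj])
  rw [key]
  have hself : (d.set (pvIdx m i) (d.getD (pvIdx m i) 0 + 1)).getD (pvIdx m i) 0
      = d.getD (pvIdx m i) 0 + 1 := by
    have : pvIdx m i < d.length := by omega
    simp [List.getD_eq_getElem?_getD, List.getElem?_set, this]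
  simp only [hself]; ring

theorem edges_dot (m : Nat) (v : List Int) (hv : v.length = m) :
    ∀ (roads : List (List Int)) (d : List Int) (s : Int), d.length = m →
    (∀ e ∈ roads, PySem.Raise.InRange m (PySem.List.pyGetD e 0 0) ∧
                  PySem.Raise.InRange m (PySem.List.pyGetD e 1 0)) →
    roads.foldl
      (fun s e => s + (PySem.List.pyGetD v (PySem.List.pyGetD e 0 0) 0
                       + PySem.List.pyGetD v (PySem.List.pyGetD e 1 0) 0)) s
    = s + (pvDot m v (roads.foldl
        (fun d e => pvInc (pvInc d (PySem.List.pyGetD e 0 0)) (PySem.List.pyGetD e 1 0)) d)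
        - pvDot m v d) := by
  intro roads
  induction roads with
  | nil => intro d s _ _; simp
  | cons e rds ih =>
    intro d s hd hcond
    obtain ⟨h0, h1⟩ := hcond e (by simp)
    have hd1 : (pvInc d (PySem.List.pyGetD e 0 0)).length = m := by rw [pvInc_length]; exact hd
    have hd2 : (pvInc (pvInc d (PySem.List.pyGetD e 0 0)) (PySem.List.pyGetD e 1 0)).length = m := by
      rw [pvInc_length]; exact hd1
    have step := ih (pvInc (pvInc d (PySem.List.pyGetD e 0 0)) (PySem.List.pyGetD e 1 0))
      (s + (PySem.List.pyGetD v (PySem.List.pyGetD e 0 0) 0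
            + PySem.List.pyGetD v (PySem.List.pyGetD e 1 0) 0))
      hd2 (fun e' he' => hcond e' (by simp [he']))
    have hdot1 := pvDot_inc m v d (PySem.List.pyGetD e 0 0) hv hd h0
    have hdot2 := pvDot_inc m v (pvInc d (PySem.List.pyGetD e 0 0))
      (PySem.List.pyGetD e 1 0) hv hd1 h1
    simp only [List.foldl_cons]
    rw [step, hdot2, hdot1]
    ring

theorem rankSum_foldl (xs : List Int) : ∀ (s c : Int),
    (xs.foldl (fun (p : Int × Int) x => (p.1 + x * p.2, p.2 + 1)) (s, c)).1
      = s + pvRankSum xs c := by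
  induction xs with
  | nil => simp [pvRankSum]
  | cons x t ih => intro s c; simp [pvRankSum, ih]; ring

theorem setfold_length : ∀ (os : List Int) (c : Int) (v0 : List Int),
    ((PySem.List.enumerate os c).foldl (fun v p => PySem.List.pySetD v p.2 p.1) v0).length
      = v0.length := by
  intro os
  induction os with
  | nil => simp [PySem.List.enumerate_nil]
  | cons o t ih =>
    intro c v0
    simp [PySem.List.enumerate_cons, ih, PySem.List.length_pySetD]

theorem setfold_other : ∀ (os : List Int) (c : Int) (v0 : List Int) (j : Nat),
    (∀ i ∈ os, 0 ≤ i ∧ i.toNat ≠ j) →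
    ((PySem.List.enumerate os c).foldl (fun v p => PySem.List.pySetD v p.2 p.1) v0).getD j 0
      = v0.getD j 0 := by
  intro os
  induction os with
  | nil => simp [PySem.List.enumerate_nil]
  | cons o t ih =>
    intro c v0 j hcond
    obtain ⟨ho, hoj⟩ := hcond o (by simp)
    simp only [PySem.List.enumerate_cons, List.foldl_cons]
    rw [ih (c + 1) _ j (fun i hi => hcond i (by simp [hi]))]
    rw [PySem.List.pySetD_of_nonneg _ _ ho]
    simp [List.getD_eq_getElem?_getD, List.getElem?_set, hoj]

theorem setfold_get : ∀ (os : List Int) (c : Int) (v0 : List Int),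
    (∀ i ∈ os, 0 ≤ i ∧ i.toNat < v0.length) → (os.map Int.toNat).Nodup →
    ∀ (k : Nat) (hk : k < os.length),
    ((PySem.List.enumerate os c).foldl (fun v p => PySem.List.pySetD v p.2 p.1) v0).getD
        (os[k]).toNat 0 = c + k := by
  intro os
  induction os with
  | nil => intro _ _ _ _ k hk; simp at hk
  | cons o t ih =>
    intro c v0 hcond hnd k hk
    obtain ⟨ho, hol⟩ := hcond o (by simp)
    simp only [List.map_cons, List.nodup_cons] at hnd
    simp only [PySem.List.enumerate_cons, List.foldl_cons]
    match k with
    | 0 =>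
      simp only [List.getElem_cons_zero]
      rw [setfold_other t (c + 1) _ o.toNat
        (fun i hi => ⟨(hcond i (by simp [hi])).1,
          fun hcontra => hnd.1 (hcontra ▸ List.mem_map_of_mem hi)⟩)]
      rw [PySem.List.pySetD_of_nonneg _ _ ho]
      simp [List.getD_eq_getElem?_getD, List.getElem?_set, hol]
    | k' + 1 =>
      simp only [List.getElem_cons_succ]
      have hlen : (PySem.List.pySetD v0 o c).length = v0.length := PySem.List.length_pySetD v0 o c
      have := ih (c + 1) (PySem.List.pySetD v0 o c)
        (fun i hi => ⟨(hcond i (by simp [hi])).1, by rw [hlen]; exact (hcond i (by simp [hi])).2⟩)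
        hnd.2 k' (by simpa using Nat.lt_of_succ_lt_succ hk)
      rw [this]; push_cast; ring

theorem sum_rank (g h : Nat → Int) : ∀ (os : List Nat) (c : Int),
    (∀ (k : Nat) (hk : k < os.length), g os[k] = c + k) →
    (os.map (fun j => g j * h j)).sum = pvRankSum (os.map h) c := by
  intro os
  induction os with
  | nil => simp [pvRankSum]
  | cons o t ih =>
    intro c hg
    have h0 : g o = c := by simpa using hg 0 (by simp)
    have ht : ∀ (k : Nat) (hk : k < t.length), g t[k] = (c + 1) + k := by
      intro k hk
      have h1 := hg (k + 1) (by simpa using Nat.succ_lt_succ hk)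
      simp only [List.getElem_cons_succ] at h1
      rw [h1]; push_cast; ring
    simp [pvRankSum, ih (c + 1) ht, h0]; ring

theorem foldl_inc_length : ∀ (roads : List (List Int)) (d : List Int),
    (roads.foldl (fun d e => pvInc (pvInc d (PySem.List.pyGetD e 0 0))
      (PySem.List.pyGetD e 1 0)) d).length = d.length := by
  intro roads
  induction roads with
  | nil => intro d; rfl
  | cons e t ih => intro d; simp only [List.foldl_cons]; rw [ih]; simp [pvInc_length]

theorem sorted2_eq_sorted_lex (xs : List (Int × Int)) :
    PySem.List.sorted2 xs (fun p => p.1) (fun p => p.2) false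
      = PySem.List.sorted xs (fun p => toLex (p.1, p.2)) false := by
  rw [PySem.List.sorted_eq_foldl_insertBy]
  unfold PySem.List.sorted2
  simp only [Bool.false_eq_true, if_false]
  congr 1
  funext acc x
  congr 1
  funext a b
  simp only [Prod.Lex.lt_iff]
  rcases lt_trichotomy a.1 b.1 with h | h | h
  · simp [h]
  · simp [h, lt_irrefl]
  · simp [h, h.asymm, h.ne']

theorem maximumImportance_sol2_main (n : Int) (roads : List (List Int))
    (hpre : Pre_maximumImportance_sol2 n roads) :
    maximumImportance_sol2 n roads = maximumImportance_sol2_alt n roads := by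
  simp only [maximumImportance_sol2, maximumImportance_sol2_alt]
  by_cases hn : 0 ≤ n
  case neg =>
    have hm : n.toNat = 0 := by omega
    have hroads : roads = [] := by
      cases roads with
      | nil => rfl
      | cons e t =>
        obtain ⟨-, h0, -⟩ := hpre e (by simp)
        obtain ⟨ha, hb⟩ := h0
        rw [hm] at ha hb
        simp at ha hb
        omega
    subst hroads
    have hnil : PySem.List.sorted (pvDegrees n []) (fun x : Int => x) false = [] := by
      rw [PySem.List.sorted_eq_nil_iff]
      simp [pvDegrees, hm]
    simp [hnil]
  case pos =>
    have hmn : (n.toNat : Int) = n := Int.toNat_of_nonneg hn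
    set deg := pvDegrees n roads with hdegdef
    have hdl : deg.length = n.toNat := by
      rw [hdegdef]; unfold pvDegrees; rw [foldl_inc_length]; simp
    set pairs := deg.zip (PySem.List.pyRange 0 n 1) with hpairs
    set spairs := PySem.List.sorted2 pairs (fun p => p.1) (fun p => p.2) false with hsp
    have hlex : spairs = PySem.List.sorted pairs (fun p => toLex (p.1, p.2)) false := by
      rw [hsp]; exact sorted2_eq_sorted_lex pairs
    set order := spairs.map (fun p => p.2) with horder
    set value := (PySem.List.enumerate order 1).foldl
      (fun v p => PySem.List.pySetD v p.2 p.1) (List.replicate n.toNat 0) with hvalue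
    have hlenr : (PySem.List.pyRange 0 n 1).length = n.toNat := by
      rw [PySem.List.length_pyRange_one]; congr 1; omega
    have hmem_pairs : ∀ p ∈ pairs, p.1 = deg.getD p.2.toNat 0 ∧ 0 ≤ p.2 ∧ p.2 < n := by
      intro p hp
      rw [hpairs] at hp
      obtain ⟨k, hk, hpk⟩ := List.mem_iff_getElem.mp hp
      have hk1 : k < deg.length := by
        have := List.length_zip (l₁ := deg) (l₂ := PySem.List.pyRange 0 n 1)
        omega
      have hk2 : k < (PySem.List.pyRange 0 n 1).length := by
        have := List.length_zip (l₁ := deg) (l₂ := PySem.List.pyRange 0 n 1)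
        omega
      rw [List.getElem_zip] at hpk
      rw [PySem.List.getElem_pyRange_one 0 n k hk2] at hpk
      subst hpk
      refine ⟨?_, by simp, ?_⟩
      · have : ((0 : Int) + (k : Int)).toNat = k := by omega
        rw [this]
        exact (List.getD_eq_getElem deg 0 hk1).symm
      · have : k < n.toNat := by omega
        omega
    have hmem_sp : ∀ p ∈ spairs, p.1 = deg.getD p.2.toNat 0 ∧ 0 ≤ p.2 ∧ p.2 < n := by
      intro p hp
      exact hmem_pairs p ((PySem.List.sorted2_perm pairs _ _ false).mem_iff.mp (hsp ▸ hp))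
    have hordermem : ∀ i ∈ order, 0 ≤ i ∧ i < n := by
      intro i hi
      rw [horder] at hi
      obtain ⟨p, hp, rfl⟩ := List.mem_map.mp hi
      exact (hmem_sp p hp).2
    have hvl : value.length = n.toNat := by rw [hvalue, setfold_length]; simp
    have hsnd : pairs.map (fun p : Int × Int => p.2) = PySem.List.pyRange 0 n 1 := by
      rw [hpairs]
      exact List.map_snd_zip (by omega)
    have horderperm : order.Perm (PySem.List.pyRange 0 n 1) := by
      rw [horder]
      have h := (PySem.List.sorted2_perm pairs (fun p => p.1) (fun p => p.2) false).map
        (fun p : Int × Int => p.2)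
      rw [hsnd] at h
      exact hsp ▸ h
    have hRmap : (PySem.List.pyRange 0 n 1).map Int.toNat = List.range n.toNat := by
      rw [PySem.List.pyRange_one, List.map_map]
      have hc : ∀ k ∈ List.range (n - 0).toNat, (Int.toNat ∘ fun k : Nat => (0 : Int) + k) k = id k := by
        intro k _; simp
      rw [List.map_congr_left hc, List.map_id]
      congr 1; omega
    have hpermnat : (order.map Int.toNat).Perm (List.range n.toNat) := by
      have h := horderperm.map Int.toNat
      rw [hRmap] at h
      exact h
    have hnodup : (order.map Int.toNat).Nodup := hpermnat.nodup_iff.mpr (List.nodup_range)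
    have hB := edges_dot n.toNat value hvl roads (List.replicate n.toNat 0) 0 (by simp)
      (fun e he => ⟨(hpre e he).2.1, (hpre e he).2.2⟩)
    have hfolddeg : roads.foldl (fun d e => pvInc (pvInc d (PySem.List.pyGetD e 0 0))
        (PySem.List.pyGetD e 1 0)) (List.replicate n.toNat 0) = deg := by
      rw [hdegdef]; rfl
    rw [hfolddeg] at hB
    have hzero : pvDot n.toNat value (List.replicate n.toNat 0) = 0 := by
      unfold pvDot
      apply List.sum_eq_zero
      intro x hx
      simp only [List.mem_map] at hx
      obtain ⟨j, hj, rfl⟩ := hx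
      have hr : (List.replicate n.toNat (0 : Int)).getD j 0 = 0 := by
        simp only [List.getD_eq_getElem?_getD, List.getElem?_replicate]
        split <;> rfl
      rw [hr, mul_zero]
    have hgetval : ∀ (k : Nat) (hk : k < (order.map Int.toNat).length),
        value.getD (order.map Int.toNat)[k] 0 = 1 + k := by
      intro k hk
      have hk' : k < order.length := by simpa using hk
      have hs := setfold_get order 1 (List.replicate n.toNat 0)
        (fun i hi => ⟨(hordermem i hi).1, by
          have h2 := (hordermem i hi).2
          have h1 := (hordermem i hi).1
          simp only [List.length_replicate]
          omega⟩)
        hnodup k hk'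
      rw [← hvalue] at hs
      simpa [List.getElem_map] using hs
    have hsum := sum_rank (fun j => value.getD j 0) (fun j => deg.getD j 0)
      (order.map Int.toNat) 1 hgetval
    have hdot : pvDot n.toNat value deg
        = ((order.map Int.toNat).map (fun j => value.getD j 0 * deg.getD j 0)).sum := by
      unfold pvDot
      exact ((hpermnat.map (fun j => value.getD j 0 * deg.getD j 0)).sum_eq).symm
    have hmapdeg : (order.map Int.toNat).map (fun j => deg.getD j 0)
        = spairs.map (fun p : Int × Int => p.1) := by
      rw [horder, List.map_map, List.map_map]
      apply List.map_congr_left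
      intro p hp
      simp only [Function.comp]
      exact ((hmem_sp p hp).1).symm
    have hsorted_eq : spairs.map (fun p : Int × Int => p.1)
        = PySem.List.sorted deg (fun x : Int => x) false := by
      apply PySem.List.eq_of_perm_of_pairwise_le_of_injective (fun x : Int => x)
        (fun a b h => h)
      · have h1 : (spairs.map (fun p : Int × Int => p.1)).Perm
            (pairs.map (fun p : Int × Int => p.1)) := by
          exact (hsp ▸ (PySem.List.sorted2_perm pairs (fun p => p.1) (fun p => p.2) false)).map _
        have h2 : pairs.map (fun p : Int × Int => p.1) = deg := by
          rw [hpairs]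
          exact List.map_fst_zip (by omega)
        rw [h2] at h1
        exact h1.trans (PySem.List.sorted_perm deg (fun x : Int => x) false).symm
      · have h := PySem.List.sorted_pairwise pairs (fun p : Int × Int => toLex (p.1, p.2))
        rw [← hlex] at h
        rw [List.pairwise_map]
        refine h.imp ?_
        intro a b hab
        have := Prod.Lex.le_iff.mp hab
        rcases this with h' | ⟨h', -⟩
        · exact le_of_lt h'
        · exact le_of_eq h'
      · exact PySem.List.sorted_pairwise deg (fun x : Int => x)
    have hfinal : pvDot n.toNat value deg
        = pvRankSum (PySem.List.sorted deg (fun x : Int => x) false) 1 := by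
      rw [hdot, hsum, hmapdeg, hsorted_eq]
    rw [rankSum_foldl, hB, hzero, hfinal]
    ring

-- ===== VERDICT (by name: the statement is the Claim_ definition above) =====
theorem maximumImportance_sol2_spec : Claim_equal_maximumImportance_sol2 := by
  intro n roads _ hpre
  unfold Spec_maximumImportance_sol2
  exact maximumImportance_sol2_main n roads hpre
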